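-- pv_equiv track=rewrite | github.com/victorelgersma/codewars | 2024/kenkamau.py | capitalize_list
-- ===== SOURCE A (Python) =====
-- def capitalize_list(s):
--     """
--     >>> capitalize_list("abcdef")
--     ['AbCdEf', 'aBcDeF']
--     >>> capitalize_list("")
--     ['', '']
--     """
--     first = []
--     second = []
--     for i, char in enumerate(s):
--         if i % 2 == 0:
--             first.append(char.upper())
--             second.append(char)
--         else:
--             first.append(char)
--             second.append(char.upper())
--     return [''.join(first), ''.join(second)]
-- ===== SOURCE B (Python) =====
-- def capitalize_list(s):
--     first = list(s)
--     second = list(s)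
--     first[::2] = [c.upper() for c in first[::2]]
--     second[1::2] = [c.upper() for c in second[1::2]]
--     return [''.join(first), ''.join(second)]
-- ===== Notes on version B (the rewrite author's own statement) =====
-- stated objective: alternative
-- what changed: Replaces the single enumerate loop with per-index modulo branching and two growing accumulators by two strided-slice passes: each variant upper-cases one parity slice in place via slice assignment.
import Mathlib
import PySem

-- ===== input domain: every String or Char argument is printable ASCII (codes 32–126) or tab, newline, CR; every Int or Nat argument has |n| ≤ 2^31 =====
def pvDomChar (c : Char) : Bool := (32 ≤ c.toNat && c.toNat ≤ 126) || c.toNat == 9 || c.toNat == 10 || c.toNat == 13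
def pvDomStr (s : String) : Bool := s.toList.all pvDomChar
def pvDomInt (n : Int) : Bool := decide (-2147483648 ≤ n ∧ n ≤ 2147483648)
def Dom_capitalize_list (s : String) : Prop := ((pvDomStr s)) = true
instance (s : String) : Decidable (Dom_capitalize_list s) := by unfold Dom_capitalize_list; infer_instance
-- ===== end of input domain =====

-- B rewrites A's single enumerate/modulo loop as two strided parity-slice passes (objective: alternative decomposition).

-- ===== PORT A =====
-- loop body: i % 2 == 0 decides which accumulator gets char.upper()
def pvStepA (fs : List Char × List Char) (p : Int × Char) : List Char × List Char :=
  if PySem.Int.mod p.1 2 == 0 then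
    (fs.1 ++ [PySem.Chars.upperChar p.2], fs.2 ++ [p.2])
  else
    (fs.1 ++ [p.2], fs.2 ++ [PySem.Chars.upperChar p.2])

def capitalize_list (s : String) : List String :=
  let r := (PySem.List.enumerate s.toList 0).foldl pvStepA ([], [])
  -- ''.join(first) of a list of 1-char strings is String.ofList of the char list
  [String.ofList r.1, String.ofList r.2]

-- ===== PORT B =====
-- hand-ported strided slice l[::2] (same as l[1::2] applied to the tail): elements at even indices
def pvEveryOther : List Char → List Char
  | [] => []
  | [c] => [c]
  | c :: _ :: t => c :: pvEveryOther t

-- scatter of the strided slice assignment: riffle the even-index elements with the odd-index ones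
def pvInterleave : List Char → List Char → List Char
  | [], ys => ys
  | x :: xs, ys => x :: pvInterleave ys xs
  termination_by xs ys => xs.length + ys.length

def capitalize_list_alt (s : String) : List String :=
  let l := s.toList
  -- first[::2] = [c.upper() for c in first[::2]]
  let first := pvInterleave ((pvEveryOther l).map PySem.Chars.upperChar) (pvEveryOther l.tail)
  -- second[1::2] = [c.upper() for c in second[1::2]]
  let second := pvInterleave (pvEveryOther l) ((pvEveryOther l.tail).map PySem.Chars.upperChar)
  [String.ofList first, String.ofList second]

-- ===== PRECONDITION & SPEC =====
def Spec_capitalize_list (s : String) (out : List String) : Prop := out = capitalize_list_alt s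
instance (s : String) (out : List String) : Decidable (Spec_capitalize_list s out) := by unfold Spec_capitalize_list; infer_instance

-- ===== CLAIM (what is proved, stated in full; the proofs are below) =====
def Claim_equal_capitalize_list : Prop := ∀ (s : String), Dom_capitalize_list s → Spec_capitalize_list s (capitalize_list s)

-- ===== LEMMAS AND PROOFS =====

-- alternate application of f (even positions) and g (odd positions)
def pvMapAlt (f g : Char → Char) : List Char → List Char
  | [] => []
  | c :: t => f c :: pvMapAlt g f t

-- what A's loop appends from position i on, first accumulator
def pvAFirst : List Char → Int → List Char
  | [], _ => []
  | c :: t, i =>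
    (if PySem.Int.mod i 2 == 0 then PySem.Chars.upperChar c else c) :: pvAFirst t (i + 1)

-- what A's loop appends from position i on, second accumulator
def pvASecond : List Char → Int → List Char
  | [], _ => []
  | c :: t, i =>
    (if PySem.Int.mod i 2 == 0 then c else PySem.Chars.upperChar c) :: pvASecond t (i + 1)

theorem pvFoldA (xs : List Char) (i : Int) (f g : List Char) :
    (PySem.List.enumerate xs i).foldl pvStepA (f, g)
      = (f ++ pvAFirst xs i, g ++ pvASecond xs i) := by
  induction xs generalizing i f g with
  | nil => simp [PySem.List.enumerate_nil, pvAFirst, pvASecond]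
  | cons c t ih =>
    rw [PySem.List.enumerate_cons]
    simp only [List.foldl_cons, pvStepA]
    cases h : (PySem.Int.mod i 2 == 0) <;> simp [h, ih, pvAFirst, pvASecond] <;>
      simp only [PySem.Int.mod, Int.fmod_eq_emod, beq_iff_eq, beq_eq_false_iff_ne,
        Int.dvd_iff_emod_eq_zero] at h ⊢ <;>
      constructor <;> intro hd <;> omega

theorem pvAFirst_eq (t : List Char) (i : Int) :
    pvAFirst t i = if PySem.Int.mod i 2 == 0 then pvMapAlt PySem.Chars.upperChar id t
                   else pvMapAlt id PySem.Chars.upperChar t := by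
  induction t generalizing i with
  | nil => simp [pvAFirst, pvMapAlt]
  | cons c t ih =>
    have hm : PySem.Int.mod i 2 = i % 2 := by simp [PySem.Int.mod, Int.fmod_eq_emod]
    have hm1 : PySem.Int.mod (i + 1) 2 = (i + 1) % 2 := by simp [PySem.Int.mod, Int.fmod_eq_emod]
    simp only [pvAFirst, ih, pvMapAlt, hm, hm1, beq_iff_eq]
    split_ifs with h1 h2 h2 <;> simp_all <;> omega

theorem pvASecond_eq (t : List Char) (i : Int) :
    pvASecond t i = if PySem.Int.mod i 2 == 0 then pvMapAlt id PySem.Chars.upperChar t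
                    else pvMapAlt PySem.Chars.upperChar id t := by
  induction t generalizing i with
  | nil => simp [pvASecond, pvMapAlt]
  | cons c t ih =>
    have hm : PySem.Int.mod i 2 = i % 2 := by simp [PySem.Int.mod, Int.fmod_eq_emod]
    have hm1 : PySem.Int.mod (i + 1) 2 = (i + 1) % 2 := by simp [PySem.Int.mod, Int.fmod_eq_emod]
    simp only [pvASecond, ih, pvMapAlt, hm, hm1, beq_iff_eq]
    split_ifs with h1 h2 h2 <;> simp_all <;> omega

theorem pvInterleave_eq (f g : Char → Char) :
    ∀ l : List Char,
      pvInterleave ((pvEveryOther l).map f) ((pvEveryOther l.tail).map g) = pvMapAlt f g l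
  | [] => by simp [pvEveryOther, pvInterleave, pvMapAlt]
  | [c] => by simp [pvEveryOther, pvInterleave, pvMapAlt]
  | c :: d :: t => by
    have hodd : pvEveryOther (d :: t) = d :: pvEveryOther t.tail := by
      cases t <;> rfl
    simp [pvEveryOther, List.tail_cons, hodd, pvInterleave, pvMapAlt]
    exact pvInterleave_eq f g t

-- ===== VERDICT (by name: the statement is the Claim_ definition above) =====
theorem capitalize_list_spec : Claim_equal_capitalize_list := by
  intro s _
  unfold Spec_capitalize_list capitalize_list capitalize_list_alt
  rw [pvFoldA]
  have h1 := pvInterleave_eq PySem.Chars.upperChar id s.toList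
  have h2 := pvInterleave_eq id PySem.Chars.upperChar s.toList
  simp only [List.map_id] at h1 h2
  simp [pvAFirst_eq, pvASecond_eq, h1, h2]
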